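-- pv_equiv track=rewrite | github.com/JoeCaswall/advent_of_code | day_1/1-1.py | find_last_digits
-- ===== SOURCE A (Python) =====
-- def find_last_digits(text):
--     last_digits = []
--     for line in text.splitlines():
--         line = line[::-1]
--         for x in line:
--             if x.isdigit():
--                 last_digits.append(int(x))
--                 break
--     return last_digits
-- ===== SOURCE B (Python) =====
-- def find_last_digits(text):
--     result = []
--     last = None
--     for c in text + "\n":
--         if c in "\r\n":
--             if last is not None:
--                 result.append(last)
--             last = None
--         elif c.isdigit():
--             last = int(c)
--     return result
-- ===== Notes on version B (the rewrite author's own statement) =====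
-- stated objective: alternative
-- what changed: Replaces A's splitlines-plus-reversed-inner-scan with a single forward pass over the raw text that overwrites an accumulator on digits and flushes it at each line break (\r\n acting as two flushes is harmless since empty lines contribute nothing).
import Mathlib
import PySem

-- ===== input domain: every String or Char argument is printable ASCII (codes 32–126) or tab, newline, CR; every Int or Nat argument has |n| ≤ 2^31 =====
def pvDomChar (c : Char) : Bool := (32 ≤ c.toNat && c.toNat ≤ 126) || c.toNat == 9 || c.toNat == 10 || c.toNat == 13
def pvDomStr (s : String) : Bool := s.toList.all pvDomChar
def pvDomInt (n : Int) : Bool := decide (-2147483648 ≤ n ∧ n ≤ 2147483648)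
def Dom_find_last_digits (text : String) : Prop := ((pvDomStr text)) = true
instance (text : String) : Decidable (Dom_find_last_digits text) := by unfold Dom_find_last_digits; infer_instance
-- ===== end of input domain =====

-- B replaces A's splitlines + reversed per-line scan by one forward pass over the raw
-- text that overwrites an accumulator on digits and flushes it at each '\r'/'\n'.

-- ===== PORT A =====
-- inner 'for x in line: if x.isdigit(): append(int(x)); break' — the first digit of the
-- (already reversed) line, as its value (int(x) on one ASCII digit char is c.toNat - 48, exact)
def pvAInner : List Char → Option Int
  | [] => none
  | c :: cs => if PySem.Chars.isdigit c then some ((c.toNat : Int) - 48) else pvAInner cs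

def find_last_digits (text : String) : List Int :=
  (PySem.Str.splitlines text).foldl
    (fun acc line =>
      -- line = line[::-1] on a string is its character reverse
      match pvAInner line.toList.reverse with
      | some d => acc ++ [d]
      | none => acc) []

-- ===== PORT B =====
-- one step of Source B's loop body: state = (result, last)
def pvStep (st : List Int × Option Int) (c : Char) : List Int × Option Int :=
  if c = '\r' ∨ c = '\n' then
    (match st.2 with
     | some d => st.1 ++ [d]
     | none => st.1, none)
  else if PySem.Chars.isdigit c then (st.1, some ((c.toNat : Int) - 48))
  else st

-- 'for c in text + "\n": …; return result'
def find_last_digits_alt (text : String) : List Int :=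
  ((text.toList ++ ['\n']).foldl pvStep ([], none)).1

-- ===== PRECONDITION & SPEC =====
def Spec_find_last_digits (text : String) (out : List Int) : Prop := out = find_last_digits_alt text
instance (text : String) (out : List Int) : Decidable (Spec_find_last_digits text out) := by unfold Spec_find_last_digits; infer_instance

-- ===== CLAIM (what is proved, stated in full; the proofs are below) =====
def Claim_equal_find_last_digits : Prop := ∀ (text : String), Dom_find_last_digits text → Spec_find_last_digits text (find_last_digits text)

-- ===== LEMMAS AND PROOFS =====

-- the line-break predicate splitlines uses, as a named function
def pvIsB (c : Char) : Bool :=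
  c.toNat == 10 || c.toNat == 13 || c.toNat == 11 || c.toNat == 12 || c.toNat == 28 ||
    c.toNat == 29 || c.toNat == 30 || c.toNat == 133 || c.toNat == 8232 || c.toNat == 8233

-- append the pending last digit (if any) to the output
def pvFlush (last : Option Int) (out : List Int) : List Int :=
  match last with
  | some d => out ++ [d]
  | none => out

-- the lines splitlines.go produces beyond its accumulator
def pvLines : List Char → List Char → List (List Char)
  | [], cur => if cur.isEmpty then [] else [cur.reverse]
  | '\x0d' :: '\n' :: rest, cur => cur.reverse :: pvLines rest []
  | c :: rest, cur => if pvIsB c then cur.reverse :: pvLines rest [] else pvLines rest (c :: cur)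

-- common spec of both folds: remaining chars, pending last digit, output so far
def pvG : List Char → Option Int → List Int → List Int
  | [], last, out => pvFlush last out
  | '\x0d' :: '\n' :: rest, last, out => pvG rest none (pvFlush last out)
  | c :: rest, last, out =>
      if pvIsB c then pvG rest none (pvFlush last out)
      else pvG rest (if PySem.Chars.isdigit c then some ((c.toNat : Int) - 48) else last) out

theorem pvG_cons (c : Char) (rest : List Char) (last : Option Int) (out : List Int)
    (h1 : ∀ r, c = '\x0d' → rest = '\n' :: r → False) :
    pvG (c :: rest) last out =
      if pvIsB c then pvG rest none (pvFlush last out)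
      else pvG rest (if PySem.Chars.isdigit c then some ((c.toNat : Int) - 48) else last) out := by
  rw [pvG.eq_def]
  split
  · rename_i heq; cases heq
  · rename_i r heq
    injection heq with h2 h3
    exact (h1 r h2 h3).elim
  · rename_i c2 r2 hno heq2
    injection heq2 with h2 h3
    subst h2; subst h3; rfl

theorem pvLines_cons (c : Char) (rest cur : List Char)
    (h1 : ∀ r, c = '\x0d' → rest = '\n' :: r → False) :
    pvLines (c :: rest) cur =
      if pvIsB c then cur.reverse :: pvLines rest [] else pvLines rest (c :: cur) := by
  rw [pvLines.eq_def]
  split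
  · rename_i heq; cases heq
  · rename_i r heq
    injection heq with h2 h3
    exact (h1 r h2 h3).elim
  · rename_i c2 r2 hno heq2
    injection heq2 with h2 h3
    subst h2; subst h3; rfl

theorem pv_go_cons (isB : Char → Bool) (c : Char) (rest cur : List Char)
    (acc : List (List Char)) (h1 : ∀ r, c = '\x0d' → rest = '\n' :: r → False) :
    PySem.Chars.splitlines.go isB (c :: rest) cur acc =
      if isB c then PySem.Chars.splitlines.go isB rest [] (cur.reverse :: acc)
      else PySem.Chars.splitlines.go isB rest (c :: cur) acc := by
  rw [PySem.Chars.splitlines.go.eq_def]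
  split
  · rename_i heq; cases heq
  · rename_i r heq
    injection heq with h2 h3
    exact (h1 r h2 h3).elim
  · rename_i c2 r2 hno heq2
    injection heq2 with h2 h3
    subst h2; subst h3; rfl

theorem pv_go_eq (cs cur : List Char) (acc : List (List Char)) :
    PySem.Chars.splitlines.go pvIsB cs cur acc = acc.reverse ++ pvLines cs cur := by
  induction cs, cur using pvLines.induct generalizing acc with
  | case1 cur hcur =>
      rw [PySem.Chars.splitlines.go]
      simp [pvLines, hcur]
  | case2 cur hcur =>
      rw [PySem.Chars.splitlines.go]
      simp [pvLines, hcur]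
  | case3 rest cur ih =>
      rw [PySem.Chars.splitlines.go]
      simp [pvLines, ih]
  | case4 c rest cur h1 hb ih =>
      rw [pv_go_cons pvIsB c rest cur acc h1, pvLines_cons c rest cur h1,
        if_pos hb, if_pos hb, ih]
      simp
  | case5 c rest cur h1 hb ih =>
      rw [pv_go_cons pvIsB c rest cur acc h1, pvLines_cons c rest cur h1,
        if_neg hb, if_neg hb, ih]

theorem pv_fold_lines (cs cur : List Char) (out : List Int) :
    (pvLines cs cur).foldl
      (fun acc line =>
        match pvAInner line.reverse with
        | some d => acc ++ [d]
        | none => acc) out = pvG cs (pvAInner cur) out := by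
  induction cs, cur using pvLines.induct generalizing out with
  | case1 cur hcur =>
      have : cur = [] := by simpa using hcur
      subst this
      simp [pvLines, pvG, pvFlush, pvAInner]
  | case2 cur hcur =>
      simp only [pvLines, if_neg hcur, pvG, List.foldl_cons, List.foldl_nil,
        List.reverse_reverse]
      rcases hA : pvAInner cur with _ | d <;> simp [pvFlush]
  | case3 rest cur ih =>
      simp only [pvLines, pvG, List.foldl_cons, List.reverse_reverse, ih, pvAInner]
      rcases hA : pvAInner cur with _ | d <;> simp [pvFlush]
  | case4 c rest cur h1 hb ih =>
      rw [pvLines_cons c rest cur h1, pvG_cons c rest _ out h1, if_pos hb, if_pos hb]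
      simp only [List.foldl_cons, List.reverse_reverse, ih, pvAInner]
      rcases hA : pvAInner cur with _ | d <;> simp [pvFlush]
  | case5 c rest cur h1 hb ih =>
      rw [pvLines_cons c rest cur h1, pvG_cons c rest _ out h1, if_neg hb, if_neg hb]
      rw [ih]
      rfl

-- on the domain, the break characters are exactly '\r' and '\n'
theorem pv_isB_dom (c : Char) (h : pvDomChar c = true) :
    pvIsB c = (decide (c = '\r' ∨ c = '\n')) := by
  have key : ∀ (a b : Char), a.toNat = b.toNat ↔ a = b := fun a b =>
    eq_iff_eq_of_cmp_eq_cmp rfl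
  have h10 : (c = '\n') ↔ c.toNat = 10 := (key c '\n').symm
  have h13 : (c = '\r') ↔ c.toNat = 13 := (key c '\r').symm
  simp only [pvDomChar, Bool.or_eq_true, Bool.and_eq_true, decide_eq_true_eq,
    beq_iff_eq] at h
  apply Bool.eq_iff_iff.mpr
  simp only [pvIsB, Bool.or_eq_true, beq_iff_eq, decide_eq_true_eq, h10, h13]
  omega

theorem pv_foldB (cs : List Char) (last : Option Int) (out : List Int)
    (hdom : ∀ c ∈ cs, pvDomChar c = true) :
    (cs ++ ['\n']).foldl pvStep (out, last) = (pvG cs last out, none) := by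
  revert hdom
  induction cs, last, out using pvG.induct with
  | case1 last out =>
      intro _
      simp only [List.nil_append, List.foldl_cons, List.foldl_nil, pvG]
      rcases last with _ | d <;> simp [pvStep, pvFlush]
  | case2 rest last out ih =>
      intro hdom
      have hr : ∀ c ∈ rest, pvDomChar c = true := fun c hc => hdom c (by simp [hc])
      have s1 : pvStep (out, last) '\x0d' = (pvFlush last out, none) := by
        rcases last with _ | d <;> simp [pvStep, pvFlush]
      have s2 : pvStep (pvFlush last out, none) '\n' = (pvFlush last out, none) := by
        simp [pvStep, pvFlush]
      rw [List.cons_append, List.cons_append, List.foldl_cons, List.foldl_cons,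
        s1, s2, ih hr, pvG]
  | case3 c rest last out h1 hb ih =>
      intro hdom
      have hc : pvDomChar c = true := hdom c (by simp)
      have hr : ∀ x ∈ rest, pvDomChar x = true := fun x hx => hdom x (by simp [hx])
      have hcn : c = '\r' ∨ c = '\n' := by
        have hB := pv_isB_dom c hc
        rw [hb] at hB
        exact of_decide_eq_true hB.symm
      have s1 : pvStep (out, last) c = (pvFlush last out, none) := by
        rcases last with _ | d <;> simp [pvStep, hcn, pvFlush]
      rw [List.cons_append, List.foldl_cons, s1, ih hr,
        pvG_cons c rest last out h1, if_pos hb]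
  | case4 c rest last out h1 hb ih =>
      intro hdom
      have hc : pvDomChar c = true := hdom c (by simp)
      have hr : ∀ x ∈ rest, pvDomChar x = true := fun x hx => hdom x (by simp [hx])
      have hcn : ¬(c = '\r' ∨ c = '\n') := by
        intro hor
        exact hb (by rw [pv_isB_dom c hc]; exact decide_eq_true hor)
      have s1 : pvStep (out, last) c =
          (out, if PySem.Chars.isdigit c then some ((c.toNat : Int) - 48) else last) := by
        simp only [pvStep, if_neg hcn]
        split <;> rfl
      rw [List.cons_append, List.foldl_cons, s1, ih hr,
        pvG_cons c rest last out h1, if_neg hb]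

-- ===== VERDICT (by name: the statement is the Claim_ definition above) =====
theorem find_last_digits_spec : Claim_equal_find_last_digits := by
  intro text hdom
  unfold Spec_find_last_digits find_last_digits find_last_digits_alt
  have hgo : PySem.Chars.splitlines text.toList =
      PySem.Chars.splitlines.go pvIsB text.toList [] [] := rfl
  have hdom' : ∀ c ∈ text.toList, pvDomChar c = true := by
    simpa [Dom_find_last_digits, pvDomStr, List.all_eq_true] using hdom
  rw [pv_foldB text.toList none [] hdom']
  simp only [PySem.Str.splitlines, List.foldl_map, String.toList_ofList, hgo,
    pv_go_eq, List.reverse_nil, List.nil_append]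
  rw [pv_fold_lines]
  rfl
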